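-- pv_equiv track=rewrite | github.com/Dharshika-112/Skill_Gap_Analyzer | backend/app/services/resume_parser.py | _find_best_skill_match
-- ===== SOURCE A (Python) =====
-- from typing import Tuple, List, Dict
--
-- def _are_skill_variants(skill1: str, skill2: str) -> bool:
--     """Check if two skills are variants of each other"""
--     # Common variations
--     variations = {
--         'js': 'javascript',
--         'javascript': 'js',
--         'ts': 'typescript',
--         'typescript': 'ts',
--         'py': 'python',
--         'python': 'py',
--         'react.js': 'react',
--         'react': 'reactjs',
--         'reactjs': 'react',
--         'node.js': 'nodejs',
--         'nodejs': 'node.js',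
--         'node': 'nodejs',
--         'c++': 'cpp',
--         'cpp': 'c++',
--         'c#': 'csharp',
--         'csharp': 'c#',
--         'sql server': 'sqlserver',
--         'sqlserver': 'sql server',
--         'mysql': 'sql',
--         'postgresql': 'sql',
--         'postgres': 'postgresql',
--         'mongodb': 'mongo',
--         'mongo': 'mongodb',
--         'html5': 'html',
--         'html': 'html5',
--         'css3': 'css',
--         'css': 'css3',
--         'machine learning': 'ml',
--         'ml': 'machine learning',
--         'artificial intelligence': 'ai',
--         'ai': 'artificial intelligence',
--         'deep learning': 'dl',
--         'dl': 'deep learning',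
--         'data structures and algorithms': 'dsa',
--         'dsa': 'data structures and algorithms',
--         'data structures': 'dsa',
--         'algorithms': 'dsa',
--         'database management system': 'dbms',
--         'dbms': 'database management system',
--         'github': 'git',
--         'git': 'github'
--     }
--
--     skill1_lower = skill1.lower().strip()
--     skill2_lower = skill2.lower().strip()
--
--     return (skill1_lower in variations and variations[skill1_lower] == skill2_lower) or \
--            (skill2_lower in variations and variations[skill2_lower] == skill1_lower)
--
-- def _find_best_skill_match(candidate: str, dataset_skills: List[str]) -> str:
--     """Find the best matching skill from dataset for a candidate skill"""
--     candidate_lower = candidate.lower().strip()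
--
--     # First try exact match
--     for skill in dataset_skills:
--         if skill.lower().strip() == candidate_lower:
--             return skill
--
--     # Try variant matching
--     for skill in dataset_skills:
--         if _are_skill_variants(candidate_lower, skill.lower().strip()):
--             return skill
--
--     # Try partial matching for common cases
--     for skill in dataset_skills:
--         skill_lower = skill.lower().strip()
--
--         # Handle specific cases
--         if candidate_lower == 'c' and skill_lower in ['c programming', 'c language', 'c/c++']:
--             return skill
--         elif candidate_lower == 'reactjs' and 'react' in skill_lower and 'react' == skill_lower:
--             return skill
--         elif candidate_lower == 'dsa' and ('data structure' in skill_lower or 'algorithm' in skill_lower):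
--             return skill
--         elif candidate_lower == 'dbms' and ('database' in skill_lower and 'management' in skill_lower):
--             return skill
--         elif candidate_lower in skill_lower or skill_lower in candidate_lower:
--             # Only match if both are substantial (avoid false positives)
--             if len(candidate_lower) >= 3 and len(skill_lower) >= 3:
--                 return skill
--
--     return None
-- ===== SOURCE B (Python) =====
-- from typing import List
--
-- _VARIATIONS = {
--     'js': 'javascript', 'javascript': 'js', 'ts': 'typescript', 'typescript': 'ts',
--     'py': 'python', 'python': 'py', 'react.js': 'react', 'react': 'reactjs',
--     'reactjs': 'react', 'node.js': 'nodejs', 'nodejs': 'node.js', 'node': 'nodejs',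
--     'c++': 'cpp', 'cpp': 'c++', 'c#': 'csharp', 'csharp': 'c#',
--     'sql server': 'sqlserver', 'sqlserver': 'sql server', 'mysql': 'sql',
--     'postgresql': 'sql', 'postgres': 'postgresql', 'mongodb': 'mongo',
--     'mongo': 'mongodb', 'html5': 'html', 'html': 'html5', 'css3': 'css',
--     'css': 'css3', 'machine learning': 'ml', 'ml': 'machine learning',
--     'artificial intelligence': 'ai', 'ai': 'artificial intelligence',
--     'deep learning': 'dl', 'dl': 'deep learning',
--     'data structures and algorithms': 'dsa', 'dsa': 'data structures and algorithms',
--     'data structures': 'dsa', 'algorithms': 'dsa',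
--     'database management system': 'dbms', 'dbms': 'database management system',
--     'github': 'git', 'git': 'github'
-- }
--
--
-- def _are_skill_variants(skill1: str, skill2: str) -> bool:
--     s1 = skill1.lower().strip()
--     s2 = skill2.lower().strip()
--     return _VARIATIONS.get(s1) == s2 or _VARIATIONS.get(s2) == s1
--
--
-- def _partial_match(cl: str, sl: str) -> bool:
--     return ((cl == 'c' and sl in ('c programming', 'c language', 'c/c++'))
--             or (cl == 'reactjs' and sl == 'react')
--             or (cl == 'dsa' and ('data structure' in sl or 'algorithm' in sl))
--             or (cl == 'dbms' and 'database' in sl and 'management' in sl)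
--             or ((cl in sl or sl in cl) and len(cl) >= 3 and len(sl) >= 3))
--
--
-- def _find_best_skill_match(candidate: str, dataset_skills: List[str]) -> str:
--     cl = candidate.lower().strip()
--     exact = variant = partial = None
--     for skill in dataset_skills:
--         sl = skill.lower().strip()
--         if exact is None and sl == cl:
--             exact = skill
--         if variant is None and _are_skill_variants(cl, sl):
--             variant = skill
--         if partial is None and _partial_match(cl, sl):
--             partial = skill
--     if exact is not None:
--         return exact
--     if variant is not None:
--         return variant
--     return partial
-- ===== Notes on version B (the rewrite author's own statement) =====
-- stated objective: alternative
-- what changed: A makes three sequential scans over dataset_skills (exact, then variant, then partial match); B makes one pass recording the first match of each tier and selects the highest-priority tier at the end.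
import Mathlib
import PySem

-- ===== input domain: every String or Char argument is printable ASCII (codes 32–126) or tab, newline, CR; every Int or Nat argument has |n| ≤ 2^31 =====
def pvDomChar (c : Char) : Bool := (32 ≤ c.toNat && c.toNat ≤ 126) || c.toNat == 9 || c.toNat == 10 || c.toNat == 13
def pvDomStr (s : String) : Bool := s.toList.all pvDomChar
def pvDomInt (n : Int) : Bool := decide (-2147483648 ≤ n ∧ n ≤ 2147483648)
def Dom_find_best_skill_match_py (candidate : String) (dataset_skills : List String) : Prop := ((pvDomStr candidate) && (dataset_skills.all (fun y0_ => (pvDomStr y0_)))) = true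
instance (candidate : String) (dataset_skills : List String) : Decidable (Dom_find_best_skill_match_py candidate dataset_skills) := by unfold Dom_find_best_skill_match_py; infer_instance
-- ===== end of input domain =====

-- B replaces A's three sequential scans by a single pass that records the first match of each
-- tier (exact / variant / partial) and picks the highest tier afterwards (objective: alternative).

-- ===== PORT A =====
-- shared module helper: the variations dict (a Python dict literal, distinct keys)
def pvVariations : PySem.Dict String String := PySem.Dict.ofList
  [("js", "javascript"), ("javascript", "js"), ("ts", "typescript"), ("typescript", "ts"),
   ("py", "python"), ("python", "py"), ("react.js", "react"), ("react", "reactjs"),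
   ("reactjs", "react"), ("node.js", "nodejs"), ("nodejs", "node.js"), ("node", "nodejs"),
   ("c++", "cpp"), ("cpp", "c++"), ("c#", "csharp"), ("csharp", "c#"),
   ("sql server", "sqlserver"), ("sqlserver", "sql server"), ("mysql", "sql"),
   ("postgresql", "sql"), ("postgres", "postgresql"), ("mongodb", "mongo"),
   ("mongo", "mongodb"), ("html5", "html"), ("html", "html5"), ("css3", "css"),
   ("css", "css3"), ("machine learning", "ml"), ("ml", "machine learning"),
   ("artificial intelligence", "ai"), ("ai", "artificial intelligence"),
   ("deep learning", "dl"), ("dl", "deep learning"),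
   ("data structures and algorithms", "dsa"), ("dsa", "data structures and algorithms"),
   ("data structures", "dsa"), ("algorithms", "dsa"),
   ("database management system", "dbms"), ("dbms", "database management system"),
   ("github", "git"), ("git", "github")]

-- shared module helper _are_skill_variants ('k in d and d[k] == v' is 'get? k = some v')
def are_skill_variants (skill1 : String) (skill2 : String) : Bool :=
  let skill1_lower := PySem.Str.strip (PySem.Str.lower skill1)
  let skill2_lower := PySem.Str.strip (PySem.Str.lower skill2)
  (pvVariations.get? skill1_lower == some skill2_lower) ||
  (pvVariations.get? skill2_lower == some skill1_lower)

-- A's first loop: exact match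
def pvFindExact (cl : String) : List String -> Option String
  | [] => none
  | skill :: rest =>
      if (PySem.Str.strip (PySem.Str.lower skill) == cl) = true then some skill
      else pvFindExact cl rest

-- A's second loop: variant match
def pvFindVariant (cl : String) : List String -> Option String
  | [] => none
  | skill :: rest =>
      if are_skill_variants cl (PySem.Str.strip (PySem.Str.lower skill)) = true then some skill
      else pvFindVariant cl rest

-- A's third loop: the if/elif partial-match chain
def pvFindPartial (cl : String) : List String -> Option String
  | [] => none
  | skill :: rest =>
      let sl := PySem.Str.strip (PySem.Str.lower skill)
      if (cl == "c" && ["c programming", "c language", "c/c++"].contains sl) = true then some skill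
      else if (cl == "reactjs" && (PySem.Str.isIn "react" sl && ("react" == sl))) = true then some skill
      else if (cl == "dsa" && (PySem.Str.isIn "data structure" sl || PySem.Str.isIn "algorithm" sl)) = true then
        some skill
      else if (cl == "dbms" && (PySem.Str.isIn "database" sl && PySem.Str.isIn "management" sl)) = true then
        some skill
      else if (PySem.Str.isIn cl sl || PySem.Str.isIn sl cl) = true then
        if (decide (3 <= PySem.Str.len cl) && decide (3 <= PySem.Str.len sl)) = true then some skill
        else pvFindPartial cl rest
      else pvFindPartial cl rest

def find_best_skill_match_py (candidate : String) (dataset_skills : List String) : Option String :=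
  match pvFindExact (PySem.Str.strip (PySem.Str.lower candidate)) dataset_skills with
  | some skill => some skill
  | none =>
    match pvFindVariant (PySem.Str.strip (PySem.Str.lower candidate)) dataset_skills with
    | some skill => some skill
    | none =>
      match pvFindPartial (PySem.Str.strip (PySem.Str.lower candidate)) dataset_skills with
      | some skill => some skill
      | none => none

-- ===== PORT B =====
-- B's _partial_match helper: the elif chain flattened to one boolean
def pvPartialMatch (cl : String) (sl : String) : Bool :=
  (cl == "c" && ["c programming", "c language", "c/c++"].contains sl) ||
  (cl == "reactjs" && (sl == "react")) ||
  (cl == "dsa" && (PySem.Str.isIn "data structure" sl || PySem.Str.isIn "algorithm" sl)) ||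
  (cl == "dbms" && (PySem.Str.isIn "database" sl && PySem.Str.isIn "management" sl)) ||
  ((PySem.Str.isIn cl sl || PySem.Str.isIn sl cl) &&
    (decide (3 <= PySem.Str.len cl) && decide (3 <= PySem.Str.len sl)))

-- B's single pass: record the first skill matching each tier
def pvStep (cl : String) (acc : Option String × Option String × Option String)
    (skill : String) : Option String × Option String × Option String :=
  let sl := PySem.Str.strip (PySem.Str.lower skill)
  (if acc.1.isNone && (sl == cl) then some skill else acc.1,
   if acc.2.1.isNone && are_skill_variants cl sl then some skill else acc.2.1,
   if acc.2.2.isNone && pvPartialMatch cl sl then some skill else acc.2.2)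

-- B's final tier selection (the trailing if-chain of Source B)
def pvPick (res : Option String × Option String × Option String) : Option String :=
  match res.1 with
  | some skill => some skill
  | none =>
    match res.2.1 with
    | some skill => some skill
    | none => res.2.2

def find_best_skill_match_py_alt (candidate : String) (dataset_skills : List String) : Option String :=
  pvPick (dataset_skills.foldl (pvStep (PySem.Str.strip (PySem.Str.lower candidate)))
    (none, none, none))

-- ===== PRECONDITION & SPEC =====
def Spec_find_best_skill_match_py (candidate : String) (dataset_skills : List String) (out : Option String) : Prop := out = find_best_skill_match_py_alt candidate dataset_skills
instance (candidate : String) (dataset_skills : List String) (out : Option String) : Decidable (Spec_find_best_skill_match_py candidate dataset_skills out) := by unfold Spec_find_best_skill_match_py; infer_instance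

-- ===== CLAIM (what is proved, stated in full; the proofs are below) =====
def Claim_equal_find_best_skill_match_py : Prop := ∀ (candidate : String) (dataset_skills : List String), Dom_find_best_skill_match_py candidate dataset_skills → Spec_find_best_skill_match_py candidate dataset_skills (find_best_skill_match_py candidate dataset_skills)

-- ===== LEMMAS AND PROOFS =====

-- A's reactjs test `'react' in sl and 'react' == sl` is B's plain `sl == 'react'`
lemma pvB2 (cl sl : String) :
    (cl == "reactjs" && (PySem.Str.isIn "react" sl && ("react" == sl))) =
    (cl == "reactjs" && (sl == "react")) := by
  by_cases hp : sl = "react"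
  · subst hp
    have h : PySem.Chars.isIn ['r', 'e', 'a', 'c', 't'] ['r', 'e', 'a', 'c', 't'] = true := by decide
    simp [h]
  · have h1 : ("react" == sl) = false := beq_eq_false_iff_ne.mpr (fun e => hp e.symm)
    have h2 : (sl == "react") = false := beq_eq_false_iff_ne.mpr hp
    simp [h1, h2]

-- a 5-branch if/elif chain returning the same value collapses to one disjunction
lemma pvChain (b1 b2 b3 b4 b5 b6 : Bool) (X R : Option String) :
    (if b1 = true then X else if b2 = true then X else if b3 = true then X
     else if b4 = true then X else if b5 = true then (if b6 = true then X else R) else R) =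
    (if (b1 || b2 || b3 || b4 || (b5 && b6)) = true then X else R) := by
  cases b1 <;> cases b2 <;> cases b3 <;> cases b4 <;> cases b5 <;> cases b6 <;> simp

-- A's elif chain takes the `return skill` branch exactly when B's flattened boolean holds
lemma pvFindPartial_cons (cl skill : String) (rest : List String) :
    pvFindPartial cl (skill :: rest) =
      if pvPartialMatch cl (PySem.Str.strip (PySem.Str.lower skill)) then some skill
      else pvFindPartial cl rest := by
  simp only [pvFindPartial, pvPartialMatch]
  rw [pvB2]
  exact pvChain _ _ _ _ _ _ _ _

-- pushing one update of a tier slot through `Option.or`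
lemma pvOrFirst (o : Option String) (b : Bool) (s : String) (r : Option String) :
    (if o.isNone && b then some s else o).or r = o.or (if b then some s else r) := by
  cases o <;> cases b <;> simp

-- the single pass computes, for each tier, the old value or else the first match of the scan
lemma pvFoldl_step (cl : String) (ds : List String) (e v p : Option String) :
    ds.foldl (pvStep cl) (e, v, p) =
      (e.or (pvFindExact cl ds), v.or (pvFindVariant cl ds), p.or (pvFindPartial cl ds)) := by
  induction ds generalizing e v p with
  | nil => simp [pvFindExact, pvFindVariant, pvFindPartial]
  | cons skill rest ih =>
    rw [List.foldl_cons]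
    show List.foldl (pvStep cl)
        (if e.isNone && (PySem.Str.strip (PySem.Str.lower skill) == cl) then some skill else e,
         if v.isNone && are_skill_variants cl (PySem.Str.strip (PySem.Str.lower skill)) then some skill else v,
         if p.isNone && pvPartialMatch cl (PySem.Str.strip (PySem.Str.lower skill)) then some skill else p)
        rest = _
    rw [ih, pvFindPartial_cons]
    simp only [pvFindExact, pvFindVariant, pvOrFirst]

theorem pv_main (candidate : String) (dataset_skills : List String) :
    find_best_skill_match_py candidate dataset_skills =
      find_best_skill_match_py_alt candidate dataset_skills := by
  unfold find_best_skill_match_py find_best_skill_match_py_alt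
  rw [pvFoldl_step]
  simp only [Option.none_or, pvPick]
  cases pvFindExact (PySem.Str.strip (PySem.Str.lower candidate)) dataset_skills <;>
    cases pvFindVariant (PySem.Str.strip (PySem.Str.lower candidate)) dataset_skills <;>
      cases pvFindPartial (PySem.Str.strip (PySem.Str.lower candidate)) dataset_skills <;> rfl

-- ===== VERDICT (by name: the statement is the Claim_ definition above) =====
theorem find_best_skill_match_py_spec : Claim_equal_find_best_skill_match_py := by
  intro candidate dataset_skills _
  exact pv_main candidate dataset_skills
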